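-- pv_equiv track=rewrite | github.com/ThatG0y/Skole-innleveringer | IT2 kap 1/handletur_oppgave.py | finnButikk
-- ===== SOURCE A (Python) =====
-- Prisoversikt = dict[str, dict[str, int]]
--
-- def finnButikk(
--     handleliste: list[str], butikkliste: list[str], prisoversikt: Prisoversikt
-- ) -> str:
--     butikkpriser = {
--         butikknavn: sum(prisoversikt[butikknavn][vare] for vare in handleliste)
--         for butikknavn in butikkliste
--     }
--     lavest_pris = min(butikkpriser.values())
--     return [
--         butikknavn
--         for butikknavn in butikkpriser.keys()
--         if butikkpriser[butikknavn] == lavest_pris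
--     ]
-- ===== SOURCE B (Python) =====
-- def finnButikk(handleliste, butikkliste, prisoversikt):
--     # Single pass with a running minimum instead of building a totals dict
--     # and scanning it twice.
--     best = None
--     billigste = []
--     for butikknavn in butikkliste:
--         total = 0
--         for vare in handleliste:
--             total += prisoversikt[butikknavn][vare]
--         if best is None or total < best:
--             best = total
--             billigste = [butikknavn]
--         elif total == best and butikknavn not in billigste:
--             billigste.append(butikknavn)
--     return billigste
-- ===== Notes on version B (the rewrite author's own statement) =====
-- stated objective: alternative
-- what changed: Replaces the totals dict plus min() plus a second filtering scan by a single pass over butikkliste that keeps a running cheapest price and the list of stores attaining it.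
import Mathlib
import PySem

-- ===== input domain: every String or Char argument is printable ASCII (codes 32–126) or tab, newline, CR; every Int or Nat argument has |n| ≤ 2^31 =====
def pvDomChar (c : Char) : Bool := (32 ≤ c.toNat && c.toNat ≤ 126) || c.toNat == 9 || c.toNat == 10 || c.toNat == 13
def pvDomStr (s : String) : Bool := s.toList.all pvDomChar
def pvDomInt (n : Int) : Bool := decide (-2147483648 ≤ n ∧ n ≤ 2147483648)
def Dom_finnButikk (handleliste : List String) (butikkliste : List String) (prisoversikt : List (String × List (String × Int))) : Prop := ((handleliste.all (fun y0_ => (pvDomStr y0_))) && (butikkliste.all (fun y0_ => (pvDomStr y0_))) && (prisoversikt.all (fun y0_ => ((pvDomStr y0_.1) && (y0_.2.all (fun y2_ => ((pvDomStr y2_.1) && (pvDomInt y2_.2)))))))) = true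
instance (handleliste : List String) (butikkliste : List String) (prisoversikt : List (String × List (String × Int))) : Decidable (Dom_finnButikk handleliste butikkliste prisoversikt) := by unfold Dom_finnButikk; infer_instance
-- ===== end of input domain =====

-- B replaces A's totals-dict + min() + second filtering scan by a single pass with a
-- running minimum; same results, structurally different (objective: alternative).


-- shared helper: total price of handleliste at store `navn` (Python's
-- `sum(prisoversikt[navn][vare] for vare in handleliste)` = B's inner accumulation loop;
-- missing keys — where Python raises KeyError — are excluded by Pre_, the `getD` defaults
-- are never reached on Pre_)
def pvTotal (handleliste : List String) (prisoversikt : List (String × List (String × Int))) (navn : String) : Int :=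
  handleliste.foldl
    (fun t vare =>
      t + ((PySem.Dict.ofList (((PySem.Dict.ofList prisoversikt).get? navn).getD [])).get? vare).getD 0)
    0

-- ===== PORT A =====
def finnButikk (handleliste : List String) (butikkliste : List String) (prisoversikt : List (String × List (String × Int))) : List String :=
  let butikkpriser : PySem.Dict String Int :=
    butikkliste.foldl (fun d navn => d.insert navn (pvTotal handleliste prisoversikt navn)) PySem.Dict.empty
  match PySem.List.min? butikkpriser.values (fun x => x) with
  | none => []   -- min([]) raises ValueError; excluded by Pre_
  | some lavest => butikkpriser.keys.filter (fun navn => butikkpriser.getD navn 0 == lavest)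

-- ===== PORT B =====
def finnButikk_alt (handleliste : List String) (butikkliste : List String) (prisoversikt : List (String × List (String × Int))) : List String :=
  (butikkliste.foldl
    (fun (st : Option Int × List String) navn =>
      let total := pvTotal handleliste prisoversikt navn
      match st.1 with
      | none => (some total, [navn])
      | some best =>
        if total < best then (some total, [navn])
        else if total == best && !(st.2.contains navn) then (some best, st.2 ++ [navn])
        else (some best, st.2))
    (none, [])).2

-- ===== PRECONDITION & SPEC =====
-- Pre_ excludes exactly the inputs where the Python A raises: empty butikkliste
-- (ValueError from min([])) and, when handleliste is nonempty, stores/wares missing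
-- from prisoversikt (KeyError; with empty handleliste the sum's generator never looks
-- anything up, so A returns there and Pre_ admits it).
def Pre_finnButikk (handleliste : List String) (butikkliste : List String) (prisoversikt : List (String × List (String × Int))) : Prop :=
  butikkliste ≠ [] ∧
  ∀ b ∈ butikkliste, ∀ v ∈ handleliste,
    ((PySem.Dict.ofList prisoversikt).get? b).isSome ∧
    ((PySem.Dict.ofList (((PySem.Dict.ofList prisoversikt).get? b).getD [])).get? v).isSome

instance (handleliste : List String) (butikkliste : List String) (prisoversikt : List (String × List (String × Int))) : Decidable (Pre_finnButikk handleliste butikkliste prisoversikt) := by unfold Pre_finnButikk; infer_instance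

def pvWitness_finnButikk : List String × List String × (List (String × List (String × Int))) :=
  (["melk"], ["A", "B"], [("A", [("melk", 3)]), ("B", [("melk", 3)])])

def Spec_finnButikk (handleliste : List String) (butikkliste : List String) (prisoversikt : List (String × List (String × Int))) (out : List String) : Prop := out = finnButikk_alt handleliste butikkliste prisoversikt
instance (handleliste : List String) (butikkliste : List String) (prisoversikt : List (String × List (String × Int))) (out : List String) : Decidable (Spec_finnButikk handleliste butikkliste prisoversikt out) := by unfold Spec_finnButikk; infer_instance

-- ===== CLAIM (what is proved, stated in full; the proofs are below) =====
def Claim_equal_finnButikk : Prop := ∀ (handleliste : List String) (butikkliste : List String) (prisoversikt : List (String × List (String × Int))), Dom_finnButikk handleliste butikkliste prisoversikt → Pre_finnButikk handleliste butikkliste prisoversikt → Spec_finnButikk handleliste butikkliste prisoversikt (finnButikk handleliste butikkliste prisoversikt)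


-- ===== LEMMAS AND PROOFS =====

-- the dict built by A's comprehension answers getD by the price function on members
theorem pv_getD_foldl (f : String → Int) (b : List String) : ∀ (d : PySem.Dict String Int) (x : String),
    (b.foldl (fun d n => d.insert n (f n)) d).getD x 0 = if x ∈ b then f x else d.getD x 0 := by
  induction b with
  | nil => intro d x; simp
  | cons n t ih =>
    intro d x
    simp only [List.foldl_cons, ih, PySem.Dict.getD_insert, List.mem_cons]
    by_cases hxt : x ∈ t
    · simp [hxt]
    · by_cases hxn : x = n <;> simp [hxt, hxn]

-- min of a list extended by one element
theorem pv_min?_snoc (xs : List Int) (a v : Int) (h : PySem.List.min? xs (fun y => y) = some a) :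
    PySem.List.min? (xs ++ [v]) (fun y => y) = some (min a v) := by
  cases xs with
  | nil => rw [(PySem.List.min?_eq_none_iff ([] : List Int) _).mpr rfl] at h; cases h
  | cons x t =>
    rw [PySem.List.min?_id_cons] at h
    injection h with h
    rw [List.cons_append, PySem.List.min?_id_cons, List.foldl_concat, h]

-- invariant of B's single pass: the state after the whole list is the minimum total
-- together with the first-occurrence list of stores attaining it
theorem pv_B_inv (f : String → Int) (b : List String) (hb : b ≠ []) :
    ∃ m, PySem.List.min? ((PySem.Set.ofList b).map f) (fun y => y) = some m ∧
      b.foldl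
        (fun (st : Option Int × List String) navn =>
          let total := f navn
          match st.1 with
          | none => (some total, [navn])
          | some best =>
            if total < best then (some total, [navn])
            else if total == best && !(st.2.contains navn) then (some best, st.2 ++ [navn])
            else (some best, st.2))
        ((none : Option Int), ([] : List String)) =
      (some m, (PySem.Set.ofList b).filter (fun k => f k == m)) := by
  induction b using List.reverseRecOn with
  | nil => exact absurd rfl hb
  | append_singleton l x ih =>
    rcases eq_or_ne l [] with rfl | hl
    · have h1 : PySem.Set.ofList [x] = [x] := PySem.Set.ofList_eq_self_of_nodup _ (by simp)
      refine ⟨f x, ?_, ?_⟩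
      · rw [List.nil_append, h1, List.map_singleton, PySem.List.min?_id_cons]
        simp
      · rw [List.nil_append, h1]
        simp
    · obtain ⟨m, hmin, hfold⟩ := ih hl
      rw [List.foldl_concat, hfold]
      have hofl : PySem.Set.ofList (l ++ [x])
          = if x ∈ l then PySem.Set.ofList l else PySem.Set.ofList l ++ [x] := by
        rw [PySem.Set.ofList_append_singleton, PySem.Set.add_eq_ite]
        by_cases hx : x ∈ l <;> simp [PySem.Set.mem_ofList, hx]
      have hminle : ∀ k ∈ l, m ≤ f k := fun k hk =>
        PySem.List.min?_isMin hmin (f k) (List.mem_map_of_mem ((PySem.Set.mem_ofList l k).mpr hk))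
      have hmemres : x ∈ (PySem.Set.ofList l).filter (fun k => f k == m) ↔ (x ∈ l ∧ f x = m) := by
        simp [List.mem_filter, PySem.Set.mem_ofList]
      rcases lt_trichotomy (f x) m with hlt | heq | hgt
      · -- strictly cheaper: reset
        have hxl : x ∉ l := fun hx => absurd hlt (not_lt.mpr (hminle x hx))
        refine ⟨f x, ?_, ?_⟩
        · rw [hofl, if_neg hxl, List.map_append, List.map_singleton,
            pv_min?_snoc _ m (f x) hmin, min_eq_right hlt.le]
        · simp only [if_pos hlt]
          rw [hofl, if_neg hxl, List.filter_append]
          have h0 : (PySem.Set.ofList l).filter (fun k => f k == f x) = [] := by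
            refine List.filter_eq_nil_iff.mpr (fun a ha => ?_)
            have := hminle a ((PySem.Set.mem_ofList l a).mp ha)
            simp only [beq_iff_eq]
            omega
          rw [h0]
          simp
      · -- tied
        have hnlt : ¬ f x < m := by omega
        have hbeq : (f x == m) = true := beq_iff_eq.mpr heq
        by_cases hxl : x ∈ l
        · have hxres : x ∈ (PySem.Set.ofList l).filter (fun k => f k == m) :=
            hmemres.mpr ⟨hxl, heq⟩
          refine ⟨m, ?_, ?_⟩
          · rw [hofl, if_pos hxl]; exact hmin
          · simp only [if_neg hnlt, hbeq, List.contains_iff_mem.mpr hxres]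
            rw [hofl, if_pos hxl]
            simp
        · have hxres : x ∉ (PySem.Set.ofList l).filter (fun k => f k == m) :=
            fun hx => hxl (hmemres.mp hx).1
          refine ⟨m, ?_, ?_⟩
          · rw [hofl, if_neg hxl, List.map_append, List.map_singleton,
              pv_min?_snoc _ m (f x) hmin, heq, min_self]
          · have hc : ((PySem.Set.ofList l).filter (fun k => f k == m)).contains x = false := by
              simp [hxres]
            simp only [if_neg hnlt, hbeq, hc]
            rw [hofl, if_neg hxl, List.filter_append]
            simp [hbeq]
      · -- strictly more expensive: unchanged
        have hnlt : ¬ f x < m := by omega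
        have hbeq : (f x == m) = false := by simp; omega
        refine ⟨m, ?_, ?_⟩
        · by_cases hxl : x ∈ l
          · rw [hofl, if_pos hxl]; exact hmin
          · rw [hofl, if_neg hxl, List.map_append, List.map_singleton,
              pv_min?_snoc _ m (f x) hmin, min_eq_left hgt.le]
        · simp only [if_neg hnlt, hbeq, Bool.false_and, if_neg (by simp : ¬ (false = true))]
          by_cases hxl : x ∈ l
          · rw [hofl, if_pos hxl]
          · rw [hofl, if_neg hxl, List.filter_append]
            simp [hbeq]

-- ===== VERDICT (by name: the statements are the Claim_ definitions above) =====
theorem finnButikk_spec : Claim_equal_finnButikk := by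
  intro h b p _hdom hpre
  obtain ⟨hb, -⟩ := hpre
  show finnButikk h b p = finnButikk_alt h b p
  obtain ⟨m, hmin, hfold⟩ := pv_B_inv (pvTotal h p) b hb
  have halt : finnButikk_alt h b p = (PySem.Set.ofList b).filter (fun k => pvTotal h p k == m) := by
    unfold finnButikk_alt
    rw [hfold]
  set d := b.foldl (fun d navn => d.insert navn (pvTotal h p navn)) PySem.Dict.empty with hd
  have hA : finnButikk h b p =
      match PySem.List.min? d.values (fun x => x) with
      | none => []
      | some lavest => d.keys.filter (fun navn => d.getD navn 0 == lavest) := rfl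
  have hnodup : d.keys.Nodup := by
    have := PySem.Dict.nodup_keys_foldl_insert b (fun _ n => pvTotal h p n) PySem.Dict.empty
      (by rw [PySem.Dict.keys_empty]; exact List.nodup_nil)
    exact this
  have hkeys : d.keys = PySem.Set.ofList b := by
    have := PySem.Dict.keys_foldl_insert b (fun _ n => pvTotal h p n) PySem.Dict.empty
    rw [hd, this, PySem.Dict.keys_empty, PySem.Set.update_nil_left]
  have hgetD : ∀ x ∈ b, d.getD x 0 = pvTotal h p x := by
    intro x hx
    rw [hd, pv_getD_foldl, if_pos hx]
  have hvals : d.values = (PySem.Set.ofList b).map (pvTotal h p) := by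
    rw [PySem.Dict.values_eq_map_keys d hnodup 0, hkeys]
    exact List.map_congr_left (fun x hx => hgetD x ((PySem.Set.mem_ofList b x).mp hx))
  rw [hA, hvals, hmin, halt, hkeys]
  exact List.filter_congr (fun x hx => by rw [hgetD x ((PySem.Set.mem_ofList b x).mp hx)])
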